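-- pv_equiv track=rewrite | github.com/Viendeptrai1/Rubik_all_in_one | algorithms/advanced/kociemba.py | _is_move_redundant
-- ===== SOURCE A (Python) =====
-- def _is_move_redundant(prev_move, move):
--     """Check if a move is redundant (e.g., U followed by U')"""
--     # Same face
--     if prev_move[0] == move[0]:
--         return True
--
--     # Opposite faces, no point doing both sequentially (optimization)
--     opposite_pairs = [('U', 'D'), ('L', 'R'), ('F', 'B')]
--     for a, b in opposite_pairs:
--         if prev_move[0] == a and move[0] == b:
--             return True
--         if prev_move[0] == b and move[0] == a:
--             return True
--
--     return False
-- ===== SOURCE B (Python) =====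
-- def _is_move_redundant(prev_move, move):
--     faces = "UDLRFB"
--     i = faces.find(prev_move[0])
--     j = faces.find(move[0])
--     if i >= 0 and j >= 0:
--         return i // 2 == j // 2
--     return prev_move[0] == move[0]
-- ===== Notes on version B (the rewrite author's own statement) =====
-- stated objective: alternative
-- what changed: Replaced the same-face guard plus the loop over three opposite-face pairs by an arithmetic formulation: look up each face's index in the string "UDLRFB" and compare axis numbers index // 2; when a first character is not a face letter it falls back to plain character equality.
import Mathlib
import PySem

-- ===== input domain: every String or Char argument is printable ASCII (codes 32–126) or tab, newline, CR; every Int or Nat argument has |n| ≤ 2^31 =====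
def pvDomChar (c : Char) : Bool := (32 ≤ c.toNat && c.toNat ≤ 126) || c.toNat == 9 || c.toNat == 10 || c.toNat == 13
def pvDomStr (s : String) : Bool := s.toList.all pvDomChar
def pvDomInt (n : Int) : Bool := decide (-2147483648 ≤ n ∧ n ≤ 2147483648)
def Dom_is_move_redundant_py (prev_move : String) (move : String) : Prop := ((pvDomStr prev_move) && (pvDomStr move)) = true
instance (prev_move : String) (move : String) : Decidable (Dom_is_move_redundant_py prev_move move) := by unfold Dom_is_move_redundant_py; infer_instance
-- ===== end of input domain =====

-- B replaces the same-face guard plus the loop over opposite-face pairs by an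
-- arithmetic formulation: index of the face in "UDLRFB", axes compared via index // 2
-- (objective: alternative, same O(1) cost).

-- ===== PORT A =====
-- A's loop over opposite_pairs with early return, ported as a fold carrying the Bool.
def is_move_redundant_py (prev_move : String) (move : String) : Bool :=
  match PySem.Str.pyGet? prev_move 0, PySem.Str.pyGet? move 0 with
  | some p, some m =>
    if p == m then true
    else
      [('U', 'D'), ('L', 'R'), ('F', 'B')].foldl
        (fun acc ab => acc || (p == ab.1 && m == ab.2) || (p == ab.2 && m == ab.1)) false
  | _, _ => false  -- unreachable under Pre_ (Python raises IndexError here)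

-- ===== PORT B =====
def is_move_redundant_py_alt (prev_move : String) (move : String) : Bool :=
  -- unreachable 'false' arms correspond to Python's IndexError (excluded by Pre_)
  match PySem.Str.pyGet? prev_move 0 with
  | none => false
  | some p =>
    match PySem.Str.pyGet? move 0 with
    | none => false
    | some m =>
      let i := PySem.Str.find "UDLRFB" (String.singleton p)
      let j := PySem.Str.find "UDLRFB" (String.singleton m)
      if 0 ≤ i && 0 ≤ j then PySem.Int.floordiv i 2 == PySem.Int.floordiv j 2
      else p == m

-- ===== PRECONDITION & SPEC =====
-- Python A raises IndexError iff a string is empty (prev_move[0] / move[0]); B raises there too.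
def Pre_is_move_redundant_py (prev_move : String) (move : String) : Prop :=
  prev_move ≠ "" ∧ move ≠ ""
instance (prev_move : String) (move : String) : Decidable (Pre_is_move_redundant_py prev_move move) := by unfold Pre_is_move_redundant_py; infer_instance
def pvWitness_is_move_redundant_py : String × String := ("U", "D'")

def Spec_is_move_redundant_py (prev_move : String) (move : String) (out : Bool) : Prop := out = is_move_redundant_py_alt prev_move move
instance (prev_move : String) (move : String) (out : Bool) : Decidable (Spec_is_move_redundant_py prev_move move out) := by unfold Spec_is_move_redundant_py; infer_instance

-- ===== CLAIM (what is proved, stated in full; the proofs are below) =====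
def Claim_equal_is_move_redundant_py : Prop := ∀ (prev_move : String) (move : String), Dom_is_move_redundant_py prev_move move → Pre_is_move_redundant_py prev_move move → Spec_is_move_redundant_py prev_move move (is_move_redundant_py prev_move move)

-- ===== LEMMAS AND PROOFS =====

-- "UDLRFB".find(c) = -1 when c is none of the six face letters.
lemma pv_find_nonface (c : Char) (h : c ∉ (['U','D','L','R','F','B'] : List Char)) :
    PySem.Str.find "UDLRFB" (String.singleton c) = -1 := by
  rw [PySem.Str.find_eq, PySem.Chars.find_eq_neg_one_iff]
  intro hinf
  have hmem : c ∈ "UDLRFB".toList :=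
    List.singleton_sublist.mp (by simpa [String.singleton] using hinf.sublist)
  exact h (by simpa using hmem)

-- Pointwise fact on the two first characters: A's guard-plus-loop equals B's axis arithmetic.
lemma pv_core (p m : Char) :
    (if p == m then true
     else [('U', 'D'), ('L', 'R'), ('F', 'B')].foldl
       (fun acc ab => acc || (p == ab.1 && m == ab.2) || (p == ab.2 && m == ab.1)) false)
    = (let i := PySem.Str.find "UDLRFB" (String.singleton p)
       let j := PySem.Str.find "UDLRFB" (String.singleton m)
       if 0 ≤ i && 0 ≤ j then PySem.Int.floordiv i 2 == PySem.Int.floordiv j 2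
       else p == m) := by
  by_cases hp : p ∈ (['U','D','L','R','F','B'] : List Char)
  · by_cases hm : m ∈ (['U','D','L','R','F','B'] : List Char)
    · fin_cases hp <;> fin_cases hm <;> decide
    · -- m is not a face letter: B falls back to p == m; A's loop finds nothing.
      have hfm := pv_find_nonface m hm
      simp only [List.mem_cons, List.not_mem_nil, or_false] at hm
      push Not at hm
      obtain ⟨g1, g2, g3, g4, g5, g6⟩ := hm
      simp only [hfm, List.foldl]
      by_cases hpm : p = m
      · subst hpm; simp
      · rw [Bool.eq_iff_iff]; simp [hpm, g1, g2, g3, g4, g5, g6]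
  · -- p is not a face letter: symmetric.
    have hfp := pv_find_nonface p hp
    simp only [List.mem_cons, List.not_mem_nil, or_false] at hp
    push Not at hp
    obtain ⟨g1, g2, g3, g4, g5, g6⟩ := hp
    simp only [hfp, List.foldl]
    by_cases hpm : p = m
    · subst hpm; simp
    · rw [Bool.eq_iff_iff]; simp [hpm, g1, g2, g3, g4, g5, g6]

theorem is_move_redundant_py_spec : Claim_equal_is_move_redundant_py := by
  intro prev_move move _hdom hpre
  unfold Spec_is_move_redundant_py is_move_redundant_py is_move_redundant_py_alt
  obtain ⟨hp, hm⟩ := hpre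
  have hp' : prev_move.toList ≠ [] := fun h => hp (String.toList_eq_nil_iff.mp h)
  have hm' : move.toList ≠ [] := fun h => hm (String.toList_eq_nil_iff.mp h)
  cases hpl : prev_move.toList with
  | nil => exact absurd hpl hp'
  | cons p ps =>
    cases hml : move.toList with
    | nil => exact absurd hml hm'
    | cons m ms =>
      have h1 : PySem.Str.pyGet? prev_move 0 = some p := by
        simp [PySem.Str.pyGet?, hpl]
      have h2 : PySem.Str.pyGet? move 0 = some m := by
        simp [PySem.Str.pyGet?, hml]
      rw [h1, h2]
      exact pv_core p m
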